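-- pv_equiv track=rewrite | github.com/KANABOON1/CS61A | cats/test.py | pawssible_patches
-- ===== SOURCE A (Python) =====
-- def pawssible_patches(start, goal, limit):
--     """
--     A diff function that computes the edit distance from START to GOAL.
--     cases:start[i]!=goal[i]:
--     1.start[i] not in goal:remove
--     2.start[i] in goal:add
--     caiteus=>kittens:kiteus(remove)=>kitteus(add)=>kittens(sub) eus<=>tens
--     """
--
--     if limit < 0:
--         return 0
--     elif start=='' or goal=='':
--         return len(start)+len(goal)
--     elif start[0]==goal[0]:
--         return pawssible_patches(start[1:],goal[1:],limit)
--     else: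
--         add_diff=1+pawssible_patches(start,goal[1:],limit-1)
--         remove_diff=1+pawssible_patches(start[1:],goal,limit-1)
--         substitue_diff=1+pawssible_patches(start[1:],goal[1:],limit-1)
--         return min(add_diff,remove_diff,substitue_diff)
-- ===== SOURCE B (Python) =====
-- def pawssible_patches(start, goal, limit):
--     """Memoized top-down DP on (i, j, budget) with common-run skipping:
--     exponential branching of the naive recursion collapses to at most
--     one computation per reachable state."""
--     n, m = len(start), len(goal)
--     memo = {}
--
--     def d(i, j, l):
--         if l < 0:
--             return 0
--         while i < n and j < m and start[i] == goal[j]: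
--             i += 1
--             j += 1
--         if i == n or j == m:
--             return (n - i) + (m - j)
--         key = (i, j, l)
--         if key in memo:
--             return memo[key]
--         v = 1 + min(d(i, j + 1, l - 1), d(i + 1, j, l - 1), d(i + 1, j + 1, l - 1))
--         memo[key] = v
--         return v
--
--     return d(0, 0, limit)
-- ===== Notes on version B (the rewrite author's own statement) =====
-- stated objective: faster
-- what changed: replaces the exponential 3-way branching recursion on string slices with a memoized top-down DP on index pairs plus budget (dict keyed by (i, j, limit)) with equal-run skipping, so each reachable state is computed once; intended as faster: the probe measured B 1.67x at the largest size both finished and A timing out from n=16 on inputs B answers in under 1 ms, but B itself exceeds Python's recursion depth on the deepest random inputs, so the speed-up was recorded as unconfirmed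
import Mathlib
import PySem

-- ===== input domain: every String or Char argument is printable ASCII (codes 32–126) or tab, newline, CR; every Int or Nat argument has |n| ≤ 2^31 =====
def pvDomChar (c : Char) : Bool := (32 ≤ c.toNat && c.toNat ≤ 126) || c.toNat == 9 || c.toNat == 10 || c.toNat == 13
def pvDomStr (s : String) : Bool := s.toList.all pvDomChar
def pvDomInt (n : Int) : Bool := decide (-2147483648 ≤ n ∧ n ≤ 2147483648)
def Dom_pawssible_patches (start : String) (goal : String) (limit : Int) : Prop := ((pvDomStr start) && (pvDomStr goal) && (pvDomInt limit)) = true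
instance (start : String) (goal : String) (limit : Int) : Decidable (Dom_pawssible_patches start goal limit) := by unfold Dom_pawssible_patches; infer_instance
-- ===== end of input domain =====

-- B replaces A's exponential 3-way branching recursion by a memoized recursion on (i, j, budget) with equal-run skipping (intended as faster; a timing run measured 1.67x at the largest size both finished and recorded the speed-up as unconfirmed).

-- ===== PORT A =====
-- A's recursion, on the character lists (strings enter via toList; start[1:] is drop 1, start[0] is head?).
-- small hand-written termination fact (cited by the ports' decreasing_by)
theorem pv_drop_lt (s : List Char) (h : s ≠ []) : (s.drop 1).length < s.length :=
  (List.length_drop (l := s) (i := 1)) ▸ Nat.sub_lt (List.length_pos_of_ne_nil h) Nat.one_pos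

def pvA (s g : List Char) (l : Int) : Int :=
  if l < 0 then 0
  else if h : s = [] ∨ g = [] then ((s.length : Int) + (g.length : Int))
  else if s.head? = g.head? then pvA (s.drop 1) (g.drop 1) l
  else
    let add_diff := 1 + pvA s (g.drop 1) (l - 1)
    let remove_diff := 1 + pvA (s.drop 1) g (l - 1)
    let substitue_diff := 1 + pvA (s.drop 1) (g.drop 1) (l - 1)
    min (min add_diff remove_diff) substitue_diff
termination_by s.length + g.length
decreasing_by
  · exact Nat.add_lt_add (pv_drop_lt s (not_or.mp h).1) (pv_drop_lt g (not_or.mp h).2)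
  · exact Nat.add_lt_add_left (pv_drop_lt g (not_or.mp h).2) s.length
  · exact Nat.add_lt_add_right (pv_drop_lt s (not_or.mp h).1) g.length
  · exact Nat.add_lt_add (pv_drop_lt s (not_or.mp h).1) (pv_drop_lt g (not_or.mp h).2)


def pawssible_patches (start : String) (goal : String) (limit : Int) : Int :=
  pvA start.toList goal.toList limit

-- ===== PORT B =====
-- B's inner `while` loop: advance i, j past equal characters.
def pvSkip (s g : List Char) (i j : Nat) : Nat × Nat :=
  if h : i < s.length ∧ j < g.length ∧ s[i]? = g[j]? then pvSkip s g (i + 1) (j + 1)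
  else (i, j)
termination_by s.length - i
decreasing_by exact Nat.sub_lt_sub_left h.1 (Nat.lt_succ_self i)


-- needed by pvGo's decreasing_by
theorem pvSkip_le (s g : List Char) (i j : Nat) :
    i ≤ (pvSkip s g i j).1 ∧ j ≤ (pvSkip s g i j).2 := by
  fun_induction pvSkip s g i j with
  | case1 i j h ih => exact ⟨Nat.le_of_succ_le ih.1, Nat.le_of_succ_le ih.2⟩
  | case2 i j h => exact ⟨Nat.le_refl i, Nat.le_refl j⟩


-- B's memoized helper d(i, j, l); the memo dict is threaded through in Python's evaluation order.
def pvGo (s g : List Char) (i j : Nat) (l : Int)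
    (memo : PySem.Dict (Nat × Nat × Int) Int) :
    Int × PySem.Dict (Nat × Nat × Int) Int :=
  if l < 0 then (0, memo)
  else
    if _h2 : s.length ≤ (pvSkip s g i j).1 ∨ g.length ≤ (pvSkip s g i j).2 then
      (((s.length : Int) - (pvSkip s g i j).1) + ((g.length : Int) - (pvSkip s g i j).2), memo)
    else
      match memo.get? ((pvSkip s g i j).1, (pvSkip s g i j).2, l) with
      | some v => (v, memo)
      | none =>
        let r1 := pvGo s g (pvSkip s g i j).1 ((pvSkip s g i j).2 + 1) (l - 1) memo
        let r2 := pvGo s g ((pvSkip s g i j).1 + 1) (pvSkip s g i j).2 (l - 1) r1.2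
        let r3 := pvGo s g ((pvSkip s g i j).1 + 1) ((pvSkip s g i j).2 + 1) (l - 1) r2.2
        let v := 1 + min (min r1.1 r2.1) r3.1
        (v, r3.2.insert ((pvSkip s g i j).1, (pvSkip s g i j).2, l) v)
termination_by (s.length - i) + (g.length - j)
decreasing_by
  · exact Nat.add_lt_add_of_le_of_lt
      (Nat.sub_le_sub_left (pvSkip_le s g i j).1 s.length)
      (Nat.sub_lt_sub_left
        (Nat.lt_of_le_of_lt (pvSkip_le s g i j).2 (Nat.lt_of_not_le (not_or.mp _h2).2))
        (Nat.lt_succ_of_le (pvSkip_le s g i j).2))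
  · exact Nat.add_lt_add_of_lt_of_le
      (Nat.sub_lt_sub_left
        (Nat.lt_of_le_of_lt (pvSkip_le s g i j).1 (Nat.lt_of_not_le (not_or.mp _h2).1))
        (Nat.lt_succ_of_le (pvSkip_le s g i j).1))
      (Nat.sub_le_sub_left (pvSkip_le s g i j).2 g.length)
  · exact Nat.add_lt_add
      (Nat.sub_lt_sub_left
        (Nat.lt_of_le_of_lt (pvSkip_le s g i j).1 (Nat.lt_of_not_le (not_or.mp _h2).1))
        (Nat.lt_succ_of_le (pvSkip_le s g i j).1))
      (Nat.sub_lt_sub_left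
        (Nat.lt_of_le_of_lt (pvSkip_le s g i j).2 (Nat.lt_of_not_le (not_or.mp _h2).2))
        (Nat.lt_succ_of_le (pvSkip_le s g i j).2))


def pawssible_patches_alt (start : String) (goal : String) (limit : Int) : Int :=
  (pvGo start.toList goal.toList 0 0 limit PySem.Dict.empty).1

-- ===== PRECONDITION & SPEC =====
def Spec_pawssible_patches (start : String) (goal : String) (limit : Int) (out : Int) : Prop := out = pawssible_patches_alt start goal limit
instance (start : String) (goal : String) (limit : Int) (out : Int) : Decidable (Spec_pawssible_patches start goal limit out) := by unfold Spec_pawssible_patches; infer_instance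

-- ===== CLAIM (what is proved, stated in full; the proofs are below) =====
def Claim_equal_pawssible_patches : Prop := ∀ (start : String) (goal : String) (limit : Int), Dom_pawssible_patches start goal limit → Spec_pawssible_patches start goal limit (pawssible_patches start goal limit)

-- ===== LEMMAS AND PROOFS =====

theorem pvSkip_bound (s g : List Char) (i j : Nat) (hi : i ≤ s.length) (hj : j ≤ g.length) :
    (pvSkip s g i j).1 ≤ s.length ∧ (pvSkip s g i j).2 ≤ g.length := by
  fun_induction pvSkip s g i j with
  | case1 i j h ih => exact ih (by omega) (by omega)
  | case2 i j h => exact ⟨hi, hj⟩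


theorem pvSkip_stop (s g : List Char) (i j : Nat) :
    ¬((pvSkip s g i j).1 < s.length ∧ (pvSkip s g i j).2 < g.length ∧
      s[(pvSkip s g i j).1]? = g[(pvSkip s g i j).2]?) := by
  fun_induction pvSkip s g i j with
  | case1 i j h ih => exact ih
  | case2 i j h => simpa using h


theorem pvA_cons_eq (a : Char) (s g : List Char) (l : Int) :
    pvA (a :: s) (a :: g) l = pvA s g l := by
  by_cases hl : l < 0
  · rw [pvA]; simp [hl]; rw [pvA]; simp [hl]
  · conv_lhs => rw [pvA]
    simp [hl]


theorem pvA_skip (s g : List Char) (i j : Nat) (l : Int) :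
    pvA (s.drop i) (g.drop j) l =
      pvA (s.drop (pvSkip s g i j).1) (g.drop (pvSkip s g i j).2) l := by
  fun_induction pvSkip s g i j with
  | case1 i j h ih =>
    obtain ⟨hi, hj, he⟩ := h
    rw [← ih]
    have hs : s.drop i = s[i] :: s.drop (i + 1) := List.drop_eq_getElem_cons hi
    have hg : g.drop j = g[j] :: g.drop (j + 1) := List.drop_eq_getElem_cons hj
    have hab : s[i] = g[j] := by simpa [List.getElem?_eq_getElem, hi, hj] using he
    rw [hs, hg, hab, pvA_cons_eq]
  | case2 i j h => rfl


def pvInv (s g : List Char) (memo : PySem.Dict (Nat × Nat × Int) Int) : Prop :=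
  ∀ i j l v, memo.get? (i, j, l) = some v → v = pvA (s.drop i) (g.drop j) l

theorem pv_min3 (a b c : Int) : 1 + min (min a b) c = min (min (1 + a) (1 + b)) (1 + c) := by
  omega

theorem pvGo_correct (s g : List Char) (i j : Nat) (l : Int)
    (memo : PySem.Dict (Nat × Nat × Int) Int) :
    i ≤ s.length → j ≤ g.length → pvInv s g memo →
    (pvGo s g i j l memo).1 = pvA (s.drop i) (g.drop j) l ∧
      pvInv s g (pvGo s g i j l memo).2 := by
  fun_induction pvGo s g i j l memo with
  | case1 i j l memo h =>
    intro hi hj hInv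
    exact ⟨by rw [pvA]; simp [h], hInv⟩
  | case2 i j l memo h1 h2 =>
    intro hi hj hInv
    refine ⟨?_, hInv⟩
    have hb := pvSkip_bound s g i j hi hj
    rw [pvA_skip s g i j l]
    have hnil : s.drop (pvSkip s g i j).1 = [] ∨ g.drop (pvSkip s g i j).2 = [] := by
      rcases h2 with h2 | h2
      · exact Or.inl (List.drop_eq_nil_iff.mpr h2)
      · exact Or.inr (List.drop_eq_nil_iff.mpr h2)
    rw [pvA]
    simp only [h1, if_false, hnil, dite_true]
    simp [List.length_drop]
    omega
  | case3 i j l memo h1 h2 v hv =>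
    intro hi hj hInv
    exact ⟨(hInv _ _ _ _ hv).trans (pvA_skip s g i j l).symm, hInv⟩
  | case4 i j l memo h1 h2 hv r1 r2 r3 v ih1 ih2 ih2x ih3 =>
    intro hi hj hInv
    rw [not_or, not_le, not_le] at h2
    have hb := pvSkip_bound s g i j hi hj
    have hstop := pvSkip_stop s g i j
    obtain ⟨e1, I1⟩ := ih1 hb.1 (by omega) hInv
    obtain ⟨e2, I2⟩ := ih2 (by omega) hb.2 I1
    obtain ⟨e3, I3⟩ := ih3 (by omega) (by omega) I2
    have hne : s[(pvSkip s g i j).1]? ≠ g[(pvSkip s g i j).2]? := by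
      intro hcon; exact hstop ⟨h2.1, h2.2, hcon⟩
    have hsd : s.drop (pvSkip s g i j).1 ≠ [] := by
      simp [List.drop_eq_nil_iff]; omega
    have hgd : g.drop (pvSkip s g i j).2 ≠ [] := by
      simp [List.drop_eq_nil_iff]; omega
    have hhead : (s.drop (pvSkip s g i j).1).head? ≠ (g.drop (pvSkip s g i j).2).head? := by
      rw [List.head?_drop, List.head?_drop]; exact hne
    have hmis : pvA (s.drop (pvSkip s g i j).1) (g.drop (pvSkip s g i j).2) l =
        min (min (1 + pvA (s.drop (pvSkip s g i j).1) (g.drop ((pvSkip s g i j).2 + 1)) (l - 1))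
            (1 + pvA (s.drop ((pvSkip s g i j).1 + 1)) (g.drop (pvSkip s g i j).2) (l - 1)))
          (1 + pvA (s.drop ((pvSkip s g i j).1 + 1)) (g.drop ((pvSkip s g i j).2 + 1)) (l - 1)) := by
      conv_lhs => rw [pvA]
      simp only [h1, if_false, hsd, hgd, or_self, hhead, List.drop_drop, dite_false]
    have hv2 : v = pvA (s.drop (pvSkip s g i j).1) (g.drop (pvSkip s g i j).2) l := by
      rw [hmis, ← pv_min3, ← e1, ← e2, ← e3]
    constructor
    · rw [pvA_skip s g i j l]
      exact hv2
    · intro i0 j0 l0 v0 h0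
      rw [PySem.Dict.get?_insert] at h0
      by_cases hk : ((i0, j0, l0) : Nat × Nat × Int) = ((pvSkip s g i j).1, (pvSkip s g i j).2, l)
      · rw [if_pos hk] at h0
        obtain ⟨k1, k2, k3⟩ : i0 = (pvSkip s g i j).1 ∧ j0 = (pvSkip s g i j).2 ∧ l0 = l := by
          simpa [Prod.ext_iff] using hk
        subst k1; subst k2; subst k3
        rw [← Option.some_inj.mp h0, hv2]
      · rw [if_neg hk] at h0
        exact I3 _ _ _ _ h0

-- ===== VERDICT (by name: the statement is the Claim_ definition above) =====
theorem pawssible_patches_spec : Claim_equal_pawssible_patches := by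
  intro start goal limit _
  unfold Spec_pawssible_patches pawssible_patches pawssible_patches_alt
  have h := pvGo_correct start.toList goal.toList 0 0 limit PySem.Dict.empty
    (by omega) (by omega) (by intro i j l v hv; simp [PySem.Dict.get?_empty] at hv)
  simpa using h.1.symm
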